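-- pv_equiv track=rewrite | github.com/vii21733/hermes-home | skills/red-teaming/godmode/scripts/parseltongue.py | circled_text
-- ===== SOURCE A (Python) =====
-- def circled_text(text, trigger_words=None):
--     """Circle each letter"""
--     result = []
--     for char in text:
--         if char.isalpha():
--             if char.islower():
--                 result.append(chr(ord(char) - ord('a') + ord('ⓐ')))
--             else:
--                 result.append(chr(ord(char) - ord('A') + ord('Ⓐ')))
--         else:
--             result.append(char)
--     return ''.join(result)
-- ===== SOURCE B (Python) =====
-- # B: precompute a str.translate table once, then translate in one call.
-- _CIRCLED = {}
-- for _i in range(26):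
--     _CIRCLED[ord('a') + _i] = chr(ord('\u24d0') + _i)
--     _CIRCLED[ord('A') + _i] = chr(ord('\u24b6') + _i)
--
--
-- def circled_text(text, trigger_words=None):
--     """Circle each letter via a precomputed translation table."""
--     return text.translate(_CIRCLED)
-- ===== Notes on version B (the rewrite author's own statement) =====
-- stated objective: faster
-- what changed: Replaced the per-character isalpha/islower branching loop with a 52-entry translation table built once at module level and a single str.translate call.
import Mathlib
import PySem

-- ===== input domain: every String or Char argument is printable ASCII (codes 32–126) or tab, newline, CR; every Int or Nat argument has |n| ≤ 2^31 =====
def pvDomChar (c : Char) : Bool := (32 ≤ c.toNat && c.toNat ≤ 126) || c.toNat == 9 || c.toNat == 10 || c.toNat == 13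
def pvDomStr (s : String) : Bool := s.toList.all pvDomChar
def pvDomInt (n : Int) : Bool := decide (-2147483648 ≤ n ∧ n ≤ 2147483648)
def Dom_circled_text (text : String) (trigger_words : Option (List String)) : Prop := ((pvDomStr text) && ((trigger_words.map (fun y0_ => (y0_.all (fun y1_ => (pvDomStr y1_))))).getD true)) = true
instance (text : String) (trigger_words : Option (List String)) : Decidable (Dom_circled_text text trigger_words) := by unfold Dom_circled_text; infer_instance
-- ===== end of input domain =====

-- B replaces A's per-character isalpha/islower branching with a translation table built once, then a single translate pass (idiomatic; same cost).

-- ===== PORT A =====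
-- per-character branch of A's loop body (appended to the accumulator `result`)
def circledA (char : Char) : Char :=
  if PySem.Chars.isalpha char then
    if PySem.Chars.islower char then
      Char.ofNat (char.toNat - 'a'.toNat + 9424)   -- chr(ord(char) - ord('a') + ord('ⓐ'))
    else
      Char.ofNat (char.toNat - 'A'.toNat + 9398)   -- chr(ord(char) - ord('A') + ord('Ⓐ'))
  else char

def circled_text (text : String) (_trigger_words : Option (List String)) : String :=
  -- result = []; for char in text: result.append(…); return ''.join(result)
  let result := text.toList.foldl (fun result char => result ++ [circledA char]) []
  String.mk result

-- ===== PORT B =====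
-- the module-level translation table: for i in range(26) insert the lower- and upper-case entries
def circledTable : PySem.Dict Char Char :=
  (PySem.List.pyRange 0 26 1).foldl
    (fun t i =>
      ((t.insert (Char.ofNat ('a'.toNat + i.toNat)) (Char.ofNat (9424 + i.toNat))).insert
         (Char.ofNat ('A'.toNat + i.toNat)) (Char.ofNat (9398 + i.toNat))))
    PySem.Dict.empty

def circled_text_alt (text : String) (_trigger_words : Option (List String)) : String :=
  -- text.translate(_CIRCLED): each char replaced by its table entry, absent chars unchanged
  String.mk (text.toList.map (fun c => (PySem.Dict.get? circledTable c).getD c))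

-- ===== PRECONDITION & SPEC =====
def Spec_circled_text (text : String) (trigger_words : Option (List String)) (out : String) : Prop := out = circled_text_alt text trigger_words
instance (text : String) (trigger_words : Option (List String)) (out : String) : Decidable (Spec_circled_text text trigger_words out) := by unfold Spec_circled_text; infer_instance

-- ===== CLAIM (what is proved, stated in full; the proofs are below) =====
def Claim_equal_circled_text : Prop := ∀ (text : String) (trigger_words : Option (List String)), Dom_circled_text text trigger_words → Spec_circled_text text trigger_words (circled_text text trigger_words)

-- ===== LEMMAS AND PROOFS =====

set_option maxRecDepth 4096 in
set_option maxHeartbeats 1000000 in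
theorem circled_char_lt' (n : Nat) (h : n < 128) :
    circledA (Char.ofNat n) = (PySem.Dict.get? circledTable (Char.ofNat n)).getD (Char.ofNat n) := by
  revert h; revert n; decide

theorem circled_foldl (l : List Char) (acc : List Char) :
    l.foldl (fun result char => result ++ [circledA char]) acc = acc ++ l.map circledA := by
  induction l generalizing acc with
  | nil => simp
  | cons c cs ih => simp [List.foldl, ih]

theorem circled_char (c : Char) (h : pvDomChar c = true) :
    circledA c = (PySem.Dict.get? circledTable c).getD c := by
  have hlt : c.toNat < 128 := by
    simp only [pvDomChar, Bool.or_eq_true, Bool.and_eq_true, decide_eq_true_eq, beq_iff_eq] at h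
    omega
  have := circled_char_lt' c.toNat hlt
  rwa [Char.ofNat_toNat] at this

-- ===== VERDICT (by name: the statement is the Claim_ definition above) =====
set_option maxRecDepth 4096 in
theorem circled_text_spec : Claim_equal_circled_text := by
  intro text trigger_words hdom
  simp only [Spec_circled_text, circled_text, circled_text_alt]
  rw [circled_foldl, List.nil_append]
  congr 1
  apply List.map_congr_left
  intro c hc
  apply circled_char
  have hs : pvDomStr text = true := by
    unfold Dom_circled_text at hdom
    exact (Bool.and_eq_true_iff.mp hdom).1
  exact List.all_eq_true.mp hs c hc
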